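-- pv_equiv track=rewrite | github.com/dreamcllectr-art/DRUCKY | tools/pharma_intel.py | _parse_phase
-- ===== SOURCE A (Python) =====
-- PHASE_ORDER = {
--     "EARLY_PHASE1": 0, "PHASE1": 1, "PHASE2": 2, "PHASE3": 3, "PHASE4": 4,
-- }
--
-- def _parse_phase(phase_list: list[str] | str | None) -> str | None:
--     """Extract the highest phase from a study's phase field."""
--     if not phase_list:
--         return None
--     if isinstance(phase_list, str):
--         phase_list = [phase_list]
--     best = None
--     best_order = -1
--     for p in phase_list:
--         clean = p.upper().replace(" ", "").replace("/", "")
--         for key, order in PHASE_ORDER.items():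
--             if key in clean and order > best_order:
--                 best = key
--                 best_order = order
--     return best
-- ===== SOURCE B (Python) =====
-- PHASE_ORDER = {
--     "EARLY_PHASE1": 0, "PHASE1": 1, "PHASE2": 2, "PHASE3": 3, "PHASE4": 4,
-- }
--
-- def _parse_phase(phase_list):
--     """Extract the highest clinical-trial phase from a study's phase field."""
--     if not phase_list:
--         return None
--     if isinstance(phase_list, str):
--         phase_list = [phase_list]
--     cleaned = [p.upper().replace(" ", "").replace("/", "") for p in phase_list]
--     for key in ["PHASE4", "PHASE3", "PHASE2", "PHASE1", "EARLY_PHASE1"]: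
--         if any(key in c for c in cleaned):
--             return key
--     return None
-- ===== Notes on version B (the rewrite author's own statement) =====
-- stated objective: simpler
-- what changed: Replaces the accumulate-the-best double loop (running best/best_order over every string and every phase key) with a normalize-once pass followed by a short-circuiting scan of the phase keys from highest to lowest, returning the first key contained in any cleaned string.
import Mathlib
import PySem

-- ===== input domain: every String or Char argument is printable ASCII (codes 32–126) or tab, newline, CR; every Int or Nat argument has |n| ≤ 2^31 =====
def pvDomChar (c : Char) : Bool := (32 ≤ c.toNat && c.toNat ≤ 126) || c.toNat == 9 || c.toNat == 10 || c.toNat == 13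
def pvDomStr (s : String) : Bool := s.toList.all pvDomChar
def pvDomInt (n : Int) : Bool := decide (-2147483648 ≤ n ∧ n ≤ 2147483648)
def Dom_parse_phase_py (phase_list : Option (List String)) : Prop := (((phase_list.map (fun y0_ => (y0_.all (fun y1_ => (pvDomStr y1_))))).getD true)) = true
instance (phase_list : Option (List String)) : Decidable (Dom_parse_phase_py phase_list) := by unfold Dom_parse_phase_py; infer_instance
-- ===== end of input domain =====

-- B replaces A's accumulate-the-best double loop by a normalize-once pass plus a
-- short-circuiting scan of the phase keys from highest to lowest (objective: simpler).
-- The isinstance-str branch of the Python is unreachable under the type Option (List String).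

-- ===== PORT A =====
def pvPhaseOrder : List (String × Int) :=
  [("EARLY_PHASE1", 0), ("PHASE1", 1), ("PHASE2", 2), ("PHASE3", 3), ("PHASE4", 4)]

def pvClean (p : String) : String :=
  PySem.Str.replace (PySem.Str.replace (PySem.Str.upper p) " " "") "/" ""

def parse_phase_py (phase_list : Option (List String)) : Option String :=
  match phase_list with
  | none => none
  | some l =>
    if l.isEmpty then none
    else
      (l.foldl (fun (acc : Option String × Int) p =>
        let clean := pvClean p
        pvPhaseOrder.foldl (fun acc kv =>
          if PySem.Str.isIn kv.1 clean && decide (kv.2 > acc.2) then (some kv.1, kv.2) else acc)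
          acc) (none, -1)).1

-- ===== PORT B =====
def parse_phase_py_alt (phase_list : Option (List String)) : Option String :=
  match phase_list with
  | none => none
  | some l =>
    if l.isEmpty then none
    else
      let cleaned := l.map pvClean
      ["PHASE4", "PHASE3", "PHASE2", "PHASE1", "EARLY_PHASE1"].find?
        (fun k => cleaned.any (fun c => PySem.Str.isIn k c))

-- ===== PRECONDITION & SPEC =====
def Spec_parse_phase_py (phase_list : Option (List String)) (out : Option String) : Prop := out = parse_phase_py_alt phase_list
instance (phase_list : Option (List String)) (out : Option String) : Decidable (Spec_parse_phase_py phase_list out) := by unfold Spec_parse_phase_py; infer_instance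

-- ===== CLAIM (what is proved, stated in full; the proofs are below) =====
def Claim_equal_parse_phase_py : Prop := ∀ (phase_list : Option (List String)), Dom_parse_phase_py phase_list → Spec_parse_phase_py phase_list (parse_phase_py phase_list)

-- ===== LEMMAS AND PROOFS =====

-- highest phase order contained in a cleaned string (-1 if none)
def pvG (c : String) : Int :=
  if PySem.Str.isIn "PHASE4" c then 4
  else if PySem.Str.isIn "PHASE3" c then 3
  else if PySem.Str.isIn "PHASE2" c then 2
  else if PySem.Str.isIn "PHASE1" c then 1
  else if PySem.Str.isIn "EARLY_PHASE1" c then 0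
  else -1

def pvKeyOf (o : Int) : Option String :=
  if o = 4 then some "PHASE4"
  else if o = 3 then some "PHASE3"
  else if o = 2 then some "PHASE2"
  else if o = 1 then some "PHASE1"
  else if o = 0 then some "EARLY_PHASE1"
  else none

def pvSt (o : Int) : Option String × Int := (pvKeyOf o, o)

lemma pvStep (c k : String) (i o : Int) (hk : pvKeyOf i = some k) :
    (if PySem.Str.isIn k c && decide (i > (pvSt o).2) then (some k, i) else pvSt o)
      = pvSt (if PySem.Str.isIn k c = true ∧ i > o then i else o) := by
  by_cases h1 : PySem.Str.isIn k c = true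
  · by_cases h2 : i > o
    · have hb : (PySem.Str.isIn k c && decide (i > (pvSt o).2)) = true := by
        simp only [pvSt, h1, Bool.true_and]; exact decide_eq_true h2
      rw [if_pos hb, if_pos ⟨h1, h2⟩]; simp only [pvSt, hk]
    · have hb : (PySem.Str.isIn k c && decide (i > (pvSt o).2)) = false := by
        simp only [pvSt, h1, Bool.true_and]; exact decide_eq_false h2
      rw [hb]
      simp only [Bool.false_eq_true, if_false]
      rw [if_neg (show ¬(PySem.Str.isIn k c = true ∧ i > o) from fun h => h2 h.2)]
  · have hb : (PySem.Str.isIn k c && decide (i > (pvSt o).2)) = false := by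
      rw [Bool.not_eq_true] at h1; rw [h1, Bool.false_and]
    rw [hb]
    simp only [Bool.false_eq_true, if_false]
    rw [if_neg (show ¬(PySem.Str.isIn k c = true ∧ i > o) from fun h => h1 h.1)]

lemma pvAcc (c : String) (o : Int) (ho : -1 ≤ o) :
    (if PySem.Str.isIn "PHASE4" c = true ∧
        4 > (if PySem.Str.isIn "PHASE3" c = true ∧
              3 > (if PySem.Str.isIn "PHASE2" c = true ∧
                    2 > (if PySem.Str.isIn "PHASE1" c = true ∧
                          1 > (if PySem.Str.isIn "EARLY_PHASE1" c = true ∧ 0 > o then 0 else o)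
                        then 1
                        else (if PySem.Str.isIn "EARLY_PHASE1" c = true ∧ 0 > o then 0 else o))
                  then 2
                  else (if PySem.Str.isIn "PHASE1" c = true ∧
                          1 > (if PySem.Str.isIn "EARLY_PHASE1" c = true ∧ 0 > o then 0 else o)
                        then 1
                        else (if PySem.Str.isIn "EARLY_PHASE1" c = true ∧ 0 > o then 0 else o)))
            then 3
            else (if PySem.Str.isIn "PHASE2" c = true ∧
                    2 > (if PySem.Str.isIn "PHASE1" c = true ∧
                          1 > (if PySem.Str.isIn "EARLY_PHASE1" c = true ∧ 0 > o then 0 else o)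
                        then 1
                        else (if PySem.Str.isIn "EARLY_PHASE1" c = true ∧ 0 > o then 0 else o))
                  then 2
                  else (if PySem.Str.isIn "PHASE1" c = true ∧
                          1 > (if PySem.Str.isIn "EARLY_PHASE1" c = true ∧ 0 > o then 0 else o)
                        then 1
                        else (if PySem.Str.isIn "EARLY_PHASE1" c = true ∧ 0 > o then 0 else o))))
      then 4
      else (if PySem.Str.isIn "PHASE3" c = true ∧
              3 > (if PySem.Str.isIn "PHASE2" c = true ∧
                    2 > (if PySem.Str.isIn "PHASE1" c = true ∧
                          1 > (if PySem.Str.isIn "EARLY_PHASE1" c = true ∧ 0 > o then 0 else o)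
                        then 1
                        else (if PySem.Str.isIn "EARLY_PHASE1" c = true ∧ 0 > o then 0 else o))
                  then 2
                  else (if PySem.Str.isIn "PHASE1" c = true ∧
                          1 > (if PySem.Str.isIn "EARLY_PHASE1" c = true ∧ 0 > o then 0 else o)
                        then 1
                        else (if PySem.Str.isIn "EARLY_PHASE1" c = true ∧ 0 > o then 0 else o)))
            then 3
            else (if PySem.Str.isIn "PHASE2" c = true ∧
                    2 > (if PySem.Str.isIn "PHASE1" c = true ∧
                          1 > (if PySem.Str.isIn "EARLY_PHASE1" c = true ∧ 0 > o then 0 else o)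
                        then 1
                        else (if PySem.Str.isIn "EARLY_PHASE1" c = true ∧ 0 > o then 0 else o))
                  then 2
                  else (if PySem.Str.isIn "PHASE1" c = true ∧
                          1 > (if PySem.Str.isIn "EARLY_PHASE1" c = true ∧ 0 > o then 0 else o)
                        then 1
                        else (if PySem.Str.isIn "EARLY_PHASE1" c = true ∧ 0 > o then 0 else o)))))
      = if pvG c > o then pvG c else o := by
  unfold pvG
  by_cases h4 : PySem.Str.isIn "PHASE4" c = true <;>
  by_cases h3 : PySem.Str.isIn "PHASE3" c = true <;>
  by_cases h2 : PySem.Str.isIn "PHASE2" c = true <;>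
  by_cases h1 : PySem.Str.isIn "PHASE1" c = true <;>
  by_cases h0 : PySem.Str.isIn "EARLY_PHASE1" c = true <;>
  simp only [h4, h3, h2, h1, h0, if_true, if_false, true_and, false_and,
    Bool.false_eq_true] <;>
  split_ifs <;> omega

lemma pvInner (c : String) (o : Int) (ho : -1 ≤ o) :
    pvPhaseOrder.foldl (fun acc kv =>
        if PySem.Str.isIn kv.1 c && decide (kv.2 > acc.2) then (some kv.1, kv.2) else acc)
      (pvSt o)
      = pvSt (if pvG c > o then pvG c else o) := by
  have s0 : ∀ o' : Int, (if PySem.Str.isIn "EARLY_PHASE1" c && decide ((0:Int) > (pvSt o').2) then ((some "EARLY_PHASE1", (0:Int)) : Option String × Int) else pvSt o') = pvSt (if PySem.Str.isIn "EARLY_PHASE1" c = true ∧ (0:Int) > o' then 0 else o') := fun o' => pvStep c _ 0 o' rfl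
  have s1 : ∀ o' : Int, (if PySem.Str.isIn "PHASE1" c && decide ((1:Int) > (pvSt o').2) then ((some "PHASE1", (1:Int)) : Option String × Int) else pvSt o') = pvSt (if PySem.Str.isIn "PHASE1" c = true ∧ (1:Int) > o' then 1 else o') := fun o' => pvStep c _ 1 o' rfl
  have s2 : ∀ o' : Int, (if PySem.Str.isIn "PHASE2" c && decide ((2:Int) > (pvSt o').2) then ((some "PHASE2", (2:Int)) : Option String × Int) else pvSt o') = pvSt (if PySem.Str.isIn "PHASE2" c = true ∧ (2:Int) > o' then 2 else o') := fun o' => pvStep c _ 2 o' rfl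
  have s3 : ∀ o' : Int, (if PySem.Str.isIn "PHASE3" c && decide ((3:Int) > (pvSt o').2) then ((some "PHASE3", (3:Int)) : Option String × Int) else pvSt o') = pvSt (if PySem.Str.isIn "PHASE3" c = true ∧ (3:Int) > o' then 3 else o') := fun o' => pvStep c _ 3 o' rfl
  have s4 : ∀ o' : Int, (if PySem.Str.isIn "PHASE4" c && decide ((4:Int) > (pvSt o').2) then ((some "PHASE4", (4:Int)) : Option String × Int) else pvSt o') = pvSt (if PySem.Str.isIn "PHASE4" c = true ∧ (4:Int) > o' then 4 else o') := fun o' => pvStep c _ 4 o' rfl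
  simp only [pvPhaseOrder, List.foldl]
  simp only [s0, s1, s2, s3, s4]
  rw [pvAcc c o ho]

lemma pvG_ge (c : String) : -1 ≤ pvG c := by unfold pvG; split_ifs <;> omega

lemma pvOuter (l : List String) (o : Int) (ho : -1 ≤ o) :
    l.foldl (fun (acc : Option String × Int) p =>
        let clean := pvClean p
        pvPhaseOrder.foldl (fun acc kv =>
          if PySem.Str.isIn kv.1 clean && decide (kv.2 > acc.2) then (some kv.1, kv.2) else acc)
          acc) (pvSt o)
      = pvSt (l.foldl (fun o p => if pvG (pvClean p) > o then pvG (pvClean p) else o) o) := by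
  induction l generalizing o with
  | nil => rfl
  | cons p t ih =>
    simp only [List.foldl]
    rw [pvInner (pvClean p) o ho]
    exact ih _ (by have := pvG_ge (pvClean p); split_ifs <;> omega)

def pvMaxg (l : List String) : Int :=
  l.foldl (fun o p => if pvG (pvClean p) > o then pvG (pvClean p) else o) (-1)

lemma pvMaxg_le (l : List String) (b : Int) (h : ∀ p ∈ l, pvG (pvClean p) ≤ b) (hb : -1 ≤ b) :
    pvMaxg l ≤ b := by
  unfold pvMaxg
  suffices H : ∀ o : Int, o ≤ b →
      l.foldl (fun o p => if pvG (pvClean p) > o then pvG (pvClean p) else o) o ≤ b from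
    H _ hb
  induction l with
  | nil => intro o h'; simpa using h'
  | cons p t ih =>
    intro o h'
    simp only [List.foldl]
    exact ih (fun q hq => h q (List.mem_cons_of_mem _ hq)) _
      (by have := h p (List.mem_cons_self ..); split_ifs <;> omega)

lemma pvFoldl_ge_init (t : List String) (o : Int) :
    o ≤ t.foldl (fun o p => if pvG (pvClean p) > o then pvG (pvClean p) else o) o := by
  induction t generalizing o with
  | nil => simp
  | cons q t ih =>
    simp only [List.foldl]
    exact le_trans (by split_ifs <;> omega) (ih _)

lemma pvMaxg_ge (l : List String) (p : String) (hp : p ∈ l) :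
    pvG (pvClean p) ≤ pvMaxg l := by
  unfold pvMaxg
  suffices H : ∀ o : Int, p ∈ l →
      pvG (pvClean p) ≤ l.foldl (fun o p => if pvG (pvClean p) > o then pvG (pvClean p) else o) o from
    H (-1) hp
  clear hp
  induction l with
  | nil => intro o h; simp at h
  | cons q t ih =>
    intro o hmem
    rcases List.mem_cons.mp hmem with h | h
    · subst h
      simp only [List.foldl]
      exact le_trans (by split_ifs <;> omega) (pvFoldl_ge_init t _)
    · simp only [List.foldl]; exact ih _ h

lemma pvG_le (c : String) : pvG c ≤ 4 := by unfold pvG; split_ifs <;> omega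

theorem pv_main (l : List String) :
    pvKeyOf (pvMaxg l) =
    (["PHASE4", "PHASE3", "PHASE2", "PHASE1", "EARLY_PHASE1"].find?
        (fun k => (l.map pvClean).any (fun c => PySem.Str.isIn k c))) := by
  simp only [List.find?_cons, List.find?_nil, List.any_map, Function.comp_def]
  by_cases h4 : (l.any fun p => PySem.Str.isIn "PHASE4" (pvClean p)) = true
  · obtain ⟨p, hp, hin⟩ := List.any_eq_true.mp h4
    have hg : pvG (pvClean p) = 4 := by unfold pvG; simp_all [PySem.Str.isIn]
    have ha := pvMaxg_ge l p hp
    have hb := pvMaxg_le l 4 (fun q _ => pvG_le _) (by omega)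
    have hm : pvMaxg l = 4 := by omega
    rw [hm, h4]; rfl
  · have b4 : ∀ q ∈ l, ¬ PySem.Str.isIn "PHASE4" (pvClean q) = true := by
      intro q hq hc; exact h4 (List.any_eq_true.mpr ⟨q, hq, hc⟩)
    rw [Bool.not_eq_true] at h4
    rw [h4]
    by_cases h3 : (l.any fun p => PySem.Str.isIn "PHASE3" (pvClean p)) = true
    · obtain ⟨p, hp, hin⟩ := List.any_eq_true.mp h3
      have hg : pvG (pvClean p) = 3 := by unfold pvG; simp_all [PySem.Str.isIn]
      have hle : ∀ q ∈ l, pvG (pvClean q) ≤ 3 := by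
        intro q hq; have := b4 q hq; unfold pvG; split_ifs <;> simp_all [PySem.Str.isIn]
      have ha := pvMaxg_ge l p hp
      have hb := pvMaxg_le l 3 hle (by omega)
      have hm : pvMaxg l = 3 := by omega
      rw [hm, h3]; rfl
    · have b3 : ∀ q ∈ l, ¬ PySem.Str.isIn "PHASE3" (pvClean q) = true := by
        intro q hq hc; exact h3 (List.any_eq_true.mpr ⟨q, hq, hc⟩)
      rw [Bool.not_eq_true] at h3
      rw [h3]
      by_cases h2 : (l.any fun p => PySem.Str.isIn "PHASE2" (pvClean p)) = true
      · obtain ⟨p, hp, hin⟩ := List.any_eq_true.mp h2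
        have hg : pvG (pvClean p) = 2 := by
          unfold pvG; simp_all [PySem.Str.isIn]
        have hle : ∀ q ∈ l, pvG (pvClean q) ≤ 2 := by
          intro q hq; have := b4 q hq; have := b3 q hq
          unfold pvG; split_ifs <;> simp_all [PySem.Str.isIn]
        have ha := pvMaxg_ge l p hp
        have hb := pvMaxg_le l 2 hle (by omega)
        have hm : pvMaxg l = 2 := by omega
        rw [hm, h2]; rfl
      · have b2 : ∀ q ∈ l, ¬ PySem.Str.isIn "PHASE2" (pvClean q) = true := by
          intro q hq hc; exact h2 (List.any_eq_true.mpr ⟨q, hq, hc⟩)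
        rw [Bool.not_eq_true] at h2
        rw [h2]
        by_cases h1 : (l.any fun p => PySem.Str.isIn "PHASE1" (pvClean p)) = true
        · obtain ⟨p, hp, hin⟩ := List.any_eq_true.mp h1
          have hg : pvG (pvClean p) = 1 := by
            unfold pvG; simp_all [PySem.Str.isIn]
          have hle : ∀ q ∈ l, pvG (pvClean q) ≤ 1 := by
            intro q hq; have := b4 q hq; have := b3 q hq; have := b2 q hq
            unfold pvG; split_ifs <;> simp_all [PySem.Str.isIn]
          have ha := pvMaxg_ge l p hp
          have hb := pvMaxg_le l 1 hle (by omega)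
          have hm : pvMaxg l = 1 := by omega
          rw [hm, h1]; rfl
        · have b1 : ∀ q ∈ l, ¬ PySem.Str.isIn "PHASE1" (pvClean q) = true := by
            intro q hq hc; exact h1 (List.any_eq_true.mpr ⟨q, hq, hc⟩)
          rw [Bool.not_eq_true] at h1
          rw [h1]
          by_cases h0 : (l.any fun p => PySem.Str.isIn "EARLY_PHASE1" (pvClean p)) = true
          · obtain ⟨p, hp, hin⟩ := List.any_eq_true.mp h0
            have hg : pvG (pvClean p) = 0 := by
              unfold pvG; simp_all [PySem.Str.isIn]
            have hle : ∀ q ∈ l, pvG (pvClean q) ≤ 0 := by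
              intro q hq
              have := b4 q hq; have := b3 q hq; have := b2 q hq; have := b1 q hq
              unfold pvG; split_ifs <;> simp_all [PySem.Str.isIn]
            have ha := pvMaxg_ge l p hp
            have hb := pvMaxg_le l 0 hle (by omega)
            have hm : pvMaxg l = 0 := by omega
            rw [hm, h0]; rfl
          · have b0 : ∀ q ∈ l, ¬ PySem.Str.isIn "EARLY_PHASE1" (pvClean q) = true := by
              intro q hq hc; exact h0 (List.any_eq_true.mpr ⟨q, hq, hc⟩)
            have hle : ∀ q ∈ l, pvG (pvClean q) ≤ -1 := by
              intro q hq
              have := b4 q hq; have := b3 q hq; have := b2 q hq; have := b1 q hq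
              have := b0 q hq
              unfold pvG; split_ifs <;> simp_all [PySem.Str.isIn]
            have hb := pvMaxg_le l (-1) hle (by omega)
            have ha := pvFoldl_ge_init l (-1)
            have hm : pvMaxg l = -1 := by unfold pvMaxg at hb ⊢; omega
            rw [Bool.not_eq_true] at h0
            rw [hm, h0]; rfl

-- ===== VERDICT (by name: the statement is the Claim_ definition above) =====
theorem parse_phase_py_spec : Claim_equal_parse_phase_py := by
  intro pl _
  unfold Spec_parse_phase_py parse_phase_py parse_phase_py_alt
  match pl with
  | none => rfl
  | some l =>
    by_cases hl : l.isEmpty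
    · simp [hl]
    · simp only [hl, if_false, Bool.false_eq_true]
      have h := pvOuter l (-1) (by omega)
      have hst : pvSt (-1) = ((none : Option String), (-1 : Int)) := by
        unfold pvSt pvKeyOf; norm_num
      rw [hst] at h
      rw [h]
      exact pv_main l
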